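-- pv_equiv track=rewrite | github.com/JKR8/querytorque_v8 | packages/qt-sql/qt_sql/optimization/pg_context_builder.py | _format_settings
-- ===== SOURCE A (Python) =====
-- def _format_settings(settings: dict[str, str]) -> str:
--     """Format PostgreSQL settings as readable text.
--
--     Args:
--         settings: Dictionary of setting name -> value
--
--     Returns:
--         Formatted settings block
--     """
--     if not settings:
--         return "(settings not available)"
--
--     lines = []
--     # Order settings by importance for query optimization
--     priority_order = [
--         'work_mem',
--         'effective_cache_size',
--         'shared_buffers',
--         'random_page_cost',
--         'seq_page_cost',
--         'join_collapse_limit',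
--         'from_collapse_limit',
--         'geqo_threshold',
--         'default_statistics_target',
--         'max_parallel_workers_per_gather',
--         'jit',
--     ]
--
--     for name in priority_order:
--         if name in settings:
--             lines.append(f"{name} = {settings[name]}")
--
--     # Add any remaining settings not in priority list
--     for name, value in sorted(settings.items()):
--         if name not in priority_order:
--             lines.append(f"{name} = {value}")
--
--     return "\n".join(lines)
-- ===== SOURCE B (Python) =====
-- def _format_settings(settings: dict[str, str]) -> str:
--     """Format PostgreSQL settings as readable text (single sort-and-emit pass)."""
--     if not settings:
--         return "(settings not available)"
--
--     priority_order = [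
--         'work_mem',
--         'effective_cache_size',
--         'shared_buffers',
--         'random_page_cost',
--         'seq_page_cost',
--         'join_collapse_limit',
--         'from_collapse_limit',
--         'geqo_threshold',
--         'default_statistics_target',
--         'max_parallel_workers_per_gather',
--         'jit',
--     ]
--     rank = {name: i for i, name in enumerate(priority_order)}
--     ordered = sorted(settings.items(),
--                      key=lambda kv: (rank.get(kv[0], len(priority_order)), kv[0]))
--     return "\n".join(f"{name} = {value}" for name, value in ordered)
-- ===== Notes on version B (the rewrite author's own statement) =====
-- stated objective: simpler
-- what changed: Replaces A's two separate emit passes (a scan over the priority list with membership tests and lookups, then a sorted scan skipping priority keys) by one sort of settings.items() under the computed key (rank.get(name, len(priority_order)), name) followed by a single format-and-join pass.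
import Mathlib
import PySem

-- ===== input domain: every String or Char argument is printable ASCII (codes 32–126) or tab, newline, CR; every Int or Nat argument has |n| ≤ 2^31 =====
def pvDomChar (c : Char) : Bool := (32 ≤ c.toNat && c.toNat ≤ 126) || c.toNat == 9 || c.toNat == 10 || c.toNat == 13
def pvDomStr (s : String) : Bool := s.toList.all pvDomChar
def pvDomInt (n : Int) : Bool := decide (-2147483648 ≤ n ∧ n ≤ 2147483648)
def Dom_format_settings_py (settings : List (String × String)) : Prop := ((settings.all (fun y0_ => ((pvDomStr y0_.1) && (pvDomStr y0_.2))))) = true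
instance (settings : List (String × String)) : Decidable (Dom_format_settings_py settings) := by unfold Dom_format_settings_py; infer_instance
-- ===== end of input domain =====

-- B replaces A's two emit passes by one computed-key sort plus one format pass (same output; objective: simpler).

-- ===== PORT A =====
def pvPriorityA : List String :=
  ["work_mem", "effective_cache_size", "shared_buffers", "random_page_cost",
   "seq_page_cost", "join_collapse_limit", "from_collapse_limit", "geqo_threshold",
   "default_statistics_target", "max_parallel_workers_per_gather", "jit"]

def format_settings_py (settings : List (String × String)) : String :=
  if settings.isEmpty then "(settings not available)"
  else
    let d := PySem.Dict.mk settings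
    -- for name in priority_order: if name in settings: lines.append(f"{name} = {settings[name]}")
    let lines1 : List String := pvPriorityA.foldl (fun acc name =>
      if d.contains name then acc ++ [name ++ " = " ++ ((d.get? name).getD "")] else acc) []
    -- for name, value in sorted(settings.items()): if name not in priority_order: lines.append(...)
    let lines2 : List String :=
      (PySem.List.sorted2 settings (fun p => p.1) (fun p => p.2) false).foldl
        (fun acc p => if !(pvPriorityA.contains p.1) then acc ++ [p.1 ++ " = " ++ p.2] else acc) lines1
    PySem.Str.join "\n" lines2

-- ===== PORT B =====
def pvPriorityB : List String :=
  ["work_mem", "effective_cache_size", "shared_buffers", "random_page_cost",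
   "seq_page_cost", "join_collapse_limit", "from_collapse_limit", "geqo_threshold",
   "default_statistics_target", "max_parallel_workers_per_gather", "jit"]

def format_settings_py_alt (settings : List (String × String)) : String :=
  if settings.isEmpty then "(settings not available)"
  else
    -- rank = {name: i for i, name in enumerate(priority_order)}
    let rank : PySem.Dict String Int :=
      PySem.Dict.ofList ((PySem.List.enumerate pvPriorityB 0).map (fun iv => (iv.2, iv.1)))
    -- ordered = sorted(settings.items(), key=lambda kv: (rank.get(kv[0], len(priority_order)), kv[0]))
    let ordered :=
      PySem.List.sorted2 settings
        (fun kv => rank.getD kv.1 (PySem.List.len pvPriorityB)) (fun kv => kv.1) false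
    PySem.Str.join "\n" (ordered.map (fun kv => kv.1 ++ " = " ++ kv.2))

-- ===== PRECONDITION & SPEC =====
-- Pre_ excludes association lists with duplicate keys: the Python parameter is a dict, which cannot
-- contain duplicates, so on duplicated lists the assoc-list reading of the programs is ambiguous.
def Pre_format_settings_py (settings : List (String × String)) : Prop :=
  (settings.map Prod.fst).Nodup
instance (settings : List (String × String)) : Decidable (Pre_format_settings_py settings) := by
  unfold Pre_format_settings_py; infer_instance

def pvWitness_format_settings_py : (List (String × String)) :=
  [("application_name", "qt"), ("work_mem", "4MB")]

def Spec_format_settings_py (settings : List (String × String)) (out : String) : Prop :=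
  out = format_settings_py_alt settings
instance (settings : List (String × String)) (out : String) : Decidable (Spec_format_settings_py settings out) := by
  unfold Spec_format_settings_py; infer_instance

-- ===== CLAIM (what is proved, stated in full; the proofs are below) =====
def Claim_equal_format_settings_py : Prop :=
  ∀ (settings : List (String × String)), Dom_format_settings_py settings →
    Pre_format_settings_py settings →
    Spec_format_settings_py settings (format_settings_py settings)

-- ===== LEMMAS AND PROOFS =====

-- B's rank lookup as a named function (definitionally the port's `rank.getD kv.1 len(priority_order)`)
def pvRk (n : String) : Int :=
  (PySem.Dict.ofList ((PySem.List.enumerate pvPriorityB 0).map (fun iv => (iv.2, iv.1)))).getD n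
    (PySem.List.len pvPriorityB)

-- the two sort keys, as lexicographic keys into a linear order
def pvKeyA (p : String × String) : Lex (String × String) := toLex (p.1, p.2)
def pvKeyB (p : String × String) : Lex (Int × String) := toLex (pvRk p.1, p.1)

lemma pv_sorted2A (xs : List (String × String)) :
    PySem.List.sorted2 xs (fun p => p.1) (fun p => p.2) false
      = PySem.List.sorted xs pvKeyA false := by
  have h : (fun a b : String × String => decide (a.1 < b.1) || (!decide (b.1 < a.1) && decide (a.2 < b.2)))
         = (fun a b : String × String => decide (pvKeyA a < pvKeyA b)) := by
    funext a b
    rcases lt_trichotomy a.1 b.1 with h1 | h1 | h1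
    · simp [pvKeyA, Prod.Lex.toLex_lt_toLex, h1, lt_asymm h1]
    · simp [pvKeyA, Prod.Lex.toLex_lt_toLex, h1]
    · simp [pvKeyA, Prod.Lex.toLex_lt_toLex, h1, lt_asymm h1]
      intro e
      exact absurd e (ne_of_gt h1)
  rw [PySem.List.sorted_eq_foldl_insertBy]
  show xs.foldl (fun acc x => PySem.List.insertBy
      (fun a b : String × String => decide (a.1 < b.1) || (!decide (b.1 < a.1) && decide (a.2 < b.2))) x acc) [] = _
  rw [h]

lemma pv_sorted2B (xs : List (String × String)) :
    PySem.List.sorted2 xs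
        (fun kv => (PySem.Dict.ofList ((PySem.List.enumerate pvPriorityB 0).map (fun iv => (iv.2, iv.1)))).getD kv.1
          (PySem.List.len pvPriorityB)) (fun kv => kv.1) false
      = PySem.List.sorted xs pvKeyB false := by
  have h : (fun a b : String × String => decide (pvRk a.1 < pvRk b.1) || (!decide (pvRk b.1 < pvRk a.1) && decide (a.1 < b.1)))
         = (fun a b : String × String => decide (pvKeyB a < pvKeyB b)) := by
    funext a b
    rcases lt_trichotomy (pvRk a.1) (pvRk b.1) with h1 | h1 | h1
    · simp [pvKeyB, Prod.Lex.toLex_lt_toLex, h1, lt_asymm h1]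
    · simp [pvKeyB, Prod.Lex.toLex_lt_toLex, h1]
    · simp [pvKeyB, Prod.Lex.toLex_lt_toLex, h1, lt_asymm h1]
      intro e
      exact absurd e (ne_of_gt h1)
  rw [PySem.List.sorted_eq_foldl_insertBy]
  show xs.foldl (fun acc x => PySem.List.insertBy
      (fun a b : String × String => decide (pvRk a.1 < pvRk b.1) || (!decide (pvRk b.1 < pvRk a.1) && decide (a.1 < b.1))) x acc) [] = _
  rw [h]

lemma pv_getD_of_fst_not_mem {l : List (String × Int)} {n : String} {d : Int}
    (h : ∀ m ∈ l.map Prod.fst, m ≠ n) : (PySem.Dict.mk l).getD n d = d := by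
  have hf : l.find? (fun p => p.1 == n) = none := by
    rw [List.find?_eq_none]
    intro p hp
    simpa using h p.1 (List.mem_map_of_mem hp)
  simp [PySem.Dict.getD, PySem.Dict.get?, hf]

lemma pv_rank_dict :
    PySem.Dict.ofList ((PySem.List.enumerate pvPriorityB 0).map (fun iv => (iv.2, iv.1)))
      = PySem.Dict.mk [("work_mem", (0 : Int)), ("effective_cache_size", 1), ("shared_buffers", 2),
          ("random_page_cost", 3), ("seq_page_cost", 4), ("join_collapse_limit", 5),
          ("from_collapse_limit", 6), ("geqo_threshold", 7), ("default_statistics_target", 8),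
          ("max_parallel_workers_per_gather", 9), ("jit", 10)] := by decide

lemma pvRk_of_not_mem (n : String) (h : n ∉ pvPriorityA) : pvRk n = 11 := by
  unfold pvRk
  rw [pv_rank_dict]
  have hlen : PySem.List.len pvPriorityB = 11 := by decide
  rw [hlen, pv_getD_of_fst_not_mem]
  intro m hm hmn
  have hmap : ([("work_mem", (0 : Int)), ("effective_cache_size", 1), ("shared_buffers", 2),
      ("random_page_cost", 3), ("seq_page_cost", 4), ("join_collapse_limit", 5),
      ("from_collapse_limit", 6), ("geqo_threshold", 7), ("default_statistics_target", 8),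
      ("max_parallel_workers_per_gather", 9), ("jit", 10)].map Prod.fst) = pvPriorityA := by decide
  have hm' : m ∈ pvPriorityA := by rwa [hmap] at hm
  exact h (hmn ▸ hm')

lemma pvRk_pairwise : pvPriorityA.Pairwise (fun a b => pvRk a < pvRk b) := by decide

lemma pvRk_lt_of_mem (n : String) (h : n ∈ pvPriorityA) : pvRk n < 11 := by
  fin_cases h <;> decide

lemma pv_fst_of_find {s : List (String × String)} {n : String} {q : String × String}
    (h : s.find? (fun p => p.1 == n) = some q) : q.1 = n := by
  have := List.find?_some h
  simpa using this

lemma pv_filter_fst_eq_of_find {s : List (String × String)} {n : String} {q : String × String}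
    (hnd : (s.map Prod.fst).Nodup)
    (h : s.find? (fun p => p.1 == n) = some q) :
    s.filter (fun p => p.1 == n) = [q] := by
  induction s with
  | nil => simp at h
  | cons x t ih =>
    have hnd' : (x.1 :: t.map Prod.fst).Nodup := by simpa using hnd
    obtain ⟨hx, ht⟩ := List.nodup_cons.mp hnd'
    by_cases hp : (x.1 == n) = true
    · simp only [List.find?_cons, hp] at h
      obtain rfl : x = q := by injection h
      simp only [List.filter_cons, hp, if_true]
      have : t.filter (fun p => p.1 == n) = [] := by
        rw [List.filter_eq_nil_iff]
        intro p hp'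
        have : p.1 ≠ x.1 := fun e => hx (e ▸ List.mem_map_of_mem hp')
        simp only [beq_iff_eq]
        intro e
        exact this (e.trans (eq_of_beq hp).symm)
      rw [this]
    · have hp' : (x.1 == n) = false := by simpa using hp
      simp only [List.find?_cons, hp'] at h
      simp only [List.filter_cons, hp', Bool.false_eq_true, if_false]
      exact ih ht h

lemma pv_filter_or_disjoint {α : Type} (p q : α → Bool) (l : List α)
    (h : ∀ x ∈ l, ¬(p x = true ∧ q x = true)) :
    (l.filter (fun x => p x || q x)).Perm (l.filter p ++ l.filter q) := by
  induction l with
  | nil => simp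
  | cons a t ih =>
    have ht : ∀ x ∈ t, ¬(p x = true ∧ q x = true) := fun x hx => h x (List.mem_cons_of_mem _ hx)
    by_cases hp : p a = true
    · have hq : q a = false := by
        by_contra hqa
        exact h a List.mem_cons_self ⟨hp, by simpa using hqa⟩
      simp only [List.filter_cons, hp, hq, Bool.true_or, if_true, if_false, Bool.false_eq_true]
      exact (ih ht).cons a
    · have hp' : p a = false := by simpa using hp
      by_cases hq : q a = true
      · simp only [List.filter_cons, hp', hq, Bool.false_or, if_true, if_false, Bool.false_eq_true]
        exact ((ih ht).cons a).trans List.perm_middle.symm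
      · have hq' : q a = false := by simpa using hq
        simp only [List.filter_cons, hp', hq', Bool.false_or, if_false, Bool.false_eq_true]
        exact ih ht

lemma pv_perm_filterMap_find? (ns : List String) (s : List (String × String))
    (hns : ns.Nodup) (hnd : (s.map Prod.fst).Nodup) :
    (ns.filterMap (fun n => s.find? (fun p => p.1 == n))).Perm
      (s.filter (fun p => ns.contains p.1)) := by
  induction ns with
  | nil => simp
  | cons n t ih =>
    obtain ⟨hn, ht⟩ := List.nodup_cons.mp hns
    have hcontains : (fun p : String × String => (n :: t).contains p.1)
        = (fun p : String × String => (p.1 == n) || t.contains p.1) := by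
      funext p
      by_cases hpn : p.1 = n <;> simp [hpn]
    rw [hcontains]
    have hdisj : ∀ x ∈ s, ¬((x.1 == n) = true ∧ (t.contains x.1) = true) := by
      rintro x hx ⟨h1, h2⟩
      exact hn (by rw [← eq_of_beq h1]; exact (List.contains_iff_mem).mp h2)
    have hmain : ((n :: t).filterMap (fun n => s.find? (fun p => p.1 == n))).Perm
        (s.filter (fun p => p.1 == n) ++ s.filter (fun p => t.contains p.1)) := by
      cases hf : s.find? (fun p => p.1 == n) with
      | none =>
        have hnil : s.filter (fun p => p.1 == n) = [] := by
          rw [List.filter_eq_nil_iff]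
          intro p hp
          exact (List.find?_eq_none.mp hf) p hp
        rw [List.filterMap_cons, hf, hnil, List.nil_append]
        exact ih ht
      | some q =>
        rw [List.filterMap_cons, hf, pv_filter_fst_eq_of_find hnd hf]
        exact (ih ht).cons q
    exact hmain.trans (pv_filter_or_disjoint _ _ s hdisj).symm

lemma pv_sortB_eq (settings : List (String × String))
    (hnd : (settings.map Prod.fst).Nodup) :
    PySem.List.sorted settings pvKeyB false
      = pvPriorityA.filterMap (fun n => settings.find? (fun p => p.1 == n))
        ++ (PySem.List.sorted settings pvKeyA false).filter
             (fun p => !(pvPriorityA.contains p.1)) := by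
  have hS : (PySem.List.sorted settings pvKeyA false).Perm settings :=
    PySem.List.sorted_perm _ _ _
  apply PySem.List.sorted_eq_of_perm_of_pairwise_lt
  · -- permutation
    have hP := pv_perm_filterMap_find? pvPriorityA settings (by decide) hnd
    have hR : ((PySem.List.sorted settings pvKeyA false).filter
        (fun p => !(pvPriorityA.contains p.1))).Perm
        (settings.filter (fun p => !(pvPriorityA.contains p.1))) := hS.filter _
    exact (hP.append hR).trans (List.filter_append_perm (fun p => pvPriorityA.contains p.1) settings)
  · -- pairwise strictly increasing under pvKeyB
    rw [List.pairwise_append]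
    refine ⟨?_, ?_, ?_⟩
    · rw [List.pairwise_filterMap]
      refine pvRk_pairwise.imp ?_
      intro a b hab p hp q hq
      have ha := pv_fst_of_find hp
      have hb := pv_fst_of_find hq
      show pvKeyB p < pvKeyB q
      rw [pvKeyB, pvKeyB, Prod.Lex.toLex_lt_toLex]
      left
      rw [ha, hb]
      exact hab
    · -- within the remaining block
      have h1 : (PySem.List.sorted settings pvKeyA false).Pairwise
          (fun a b => pvKeyA a ≤ pvKeyA b) := PySem.List.sorted_pairwise _ _
      have hnd' : ((PySem.List.sorted settings pvKeyA false).map Prod.fst).Nodup :=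
        ((hS.map Prod.fst).nodup_iff).mpr hnd
      have h2 : (PySem.List.sorted settings pvKeyA false).Pairwise
          (fun a b => a.1 ≠ b.1) := List.pairwise_map.mp hnd'
      have h3 : (PySem.List.sorted settings pvKeyA false).Pairwise
          (fun a b => a.1 < b.1) := by
        refine (h1.and h2).imp ?_
        rintro a b ⟨hle, hne⟩
        rw [pvKeyA, pvKeyA, Prod.Lex.toLex_le_toLex] at hle
        rcases hle with h | ⟨h, _⟩
        · exact h
        · exact absurd h hne
      refine List.Pairwise.imp_of_mem ?_ (h3.filter _)
      intro a b ha hb hab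
      have ha' : a.1 ∉ pvPriorityA := by
        have := (List.mem_filter.mp ha).2
        simpa [List.contains_iff_mem] using this
      have hb' : b.1 ∉ pvPriorityA := by
        have := (List.mem_filter.mp hb).2
        simpa [List.contains_iff_mem] using this
      show pvKeyB a < pvKeyB b
      rw [pvKeyB, pvKeyB, Prod.Lex.toLex_lt_toLex]
      right
      exact ⟨by rw [pvRk_of_not_mem _ ha', pvRk_of_not_mem _ hb'], hab⟩
    · -- across the two blocks
      intro p hp q hq
      obtain ⟨n, hnmem, hfind⟩ := List.mem_filterMap.mp hp
      have hp1 : p.1 ∈ pvPriorityA := by rw [pv_fst_of_find hfind]; exact hnmem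
      have hq1 : q.1 ∉ pvPriorityA := by
        have := (List.mem_filter.mp hq).2
        simpa [List.contains_iff_mem] using this
      show pvKeyB p < pvKeyB q
      rw [pvKeyB, pvKeyB, Prod.Lex.toLex_lt_toLex]
      left
      rw [pvRk_of_not_mem _ hq1]
      exact pvRk_lt_of_mem _ hp1

lemma pv_lines1_eq (ns : List String) (s : List (String × String)) :
    (ns.filter (fun n => (PySem.Dict.mk s).contains n)).map
        (fun name => name ++ " = " ++ (((PySem.Dict.mk s).get? name).getD ""))
      = (ns.filterMap (fun n => s.find? (fun p => p.1 == n))).map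
        (fun p => p.1 ++ " = " ++ p.2) := by
  induction ns with
  | nil => rfl
  | cons n t ih =>
    cases hf : s.find? (fun p => p.1 == n) with
    | none =>
      have hc : (PySem.Dict.mk s).contains n = false := by
        simp only [PySem.Dict.contains]
        rw [List.any_eq_false]
        intro p hp
        exact (List.find?_eq_none.mp hf) p hp
      rw [List.filter_cons_of_neg (by simp [hc]), List.filterMap_cons, hf]
      exact ih
    | some q =>
      have hmem := List.mem_of_find?_eq_some hf
      have hpq := List.find?_some hf
      have hc : (PySem.Dict.mk s).contains n = true := by
        simp only [PySem.Dict.contains]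
        rw [List.any_eq_true]
        exact ⟨q, hmem, hpq⟩
      have hq1 : q.1 = n := by simpa using hpq
      rw [List.filter_cons_of_pos hc, List.filterMap_cons, hf, List.map_cons, List.map_cons, ih]
      congr 1
      simp [PySem.Dict.get?, hf, hq1]

-- ===== VERDICT (by name: the statement is the Claim_ definition above) =====
theorem format_settings_py_spec : Claim_equal_format_settings_py := by
  intro settings _ hpre
  unfold Spec_format_settings_py
  unfold Pre_format_settings_py at hpre
  by_cases hne : settings.isEmpty
  · simp [format_settings_py, format_settings_py_alt, hne]
  · simp only [format_settings_py, format_settings_py_alt, if_neg hne]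
    rw [pv_sorted2A, pv_sorted2B]
    rw [PySem.List.foldl_append_if, PySem.List.foldl_append_if]
    rw [pv_sortB_eq settings hpre]
    rw [List.map_append, List.nil_append]
    rw [pv_lines1_eq]
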